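-- pv_equiv track=rewrite | github.com/Javier-Rojas-Orrante/OptimizacionEstocastica | tiny_test.py | _build_hex_edges_n
-- ===== SOURCE A (Python) =====
-- def _build_hex_edges_n(n_sites):
--     def hex_count(R): return 1 + 3*R*(R+1)
--     R = 0
--     while hex_count(R) < n_sites:
--         R += 1
--     coords = []
--     for q in range(-R, R+1):
--         rmin = max(-R, -q-R)
--         rmax = min(R, -q+R)
--         for r in range(rmin, rmax+1):
--             coords.append((q, r))
--     coords = coords[:n_sites]
--     coord_to_id = {coords[i]: i for i in range(n_sites)}
--     N = list(range(n_sites))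
--     dirs = [(1,0),(1,-1),(0,-1),(-1,0),(-1,1),(0,1)]
--     E = set()
--     for u in N:
--         q,r = coords[u]
--         for dq,dr in dirs:
--             v = coord_to_id.get((q+dq, r+dr))
--             if v is not None and u < v:
--                 E.add((u, v))
--     return N, sorted(E)
-- ===== SOURCE B (Python) =====
-- def _build_hex_edges_n(n_sites):
--     R = 0
--     while 1 + 3*R*(R+1) < n_sites:
--         R += 1
--     coords = []
--     for q in range(-R, R+1):
--         for r in range(max(-R, -q-R), min(R, -q+R)+1):
--             coords.append((q, r))
--     coords = coords[:n_sites]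
--     N = list(range(n_sites))
--     E = []
--     for u in N:
--         q, r = coords[u]
--         for dq, dr in ((0, 1), (1, -1), (1, 0)):
--             t = (q + dq, r + dr)
--             lo, hi = 0, n_sites
--             while lo < hi:
--                 mid = (lo + hi) // 2
--                 if coords[mid] < t:
--                     lo = mid + 1
--                 else:
--                     hi = mid
--             if lo < n_sites and coords[lo] == t:
--                 E.append((u, lo))
--     return N, E
-- ===== Notes on version B (the rewrite author's own statement) =====
-- stated objective: alternative
-- what changed: Replaces A's coordinate-to-index hash map, six-direction probing with an u<v filter, set accumulation and final sort by binary search on the lexicographically sorted coordinate list for the three lex-increasing directions only, appending edges directly in sorted order (no dict, no set, no sort).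
import Mathlib
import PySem

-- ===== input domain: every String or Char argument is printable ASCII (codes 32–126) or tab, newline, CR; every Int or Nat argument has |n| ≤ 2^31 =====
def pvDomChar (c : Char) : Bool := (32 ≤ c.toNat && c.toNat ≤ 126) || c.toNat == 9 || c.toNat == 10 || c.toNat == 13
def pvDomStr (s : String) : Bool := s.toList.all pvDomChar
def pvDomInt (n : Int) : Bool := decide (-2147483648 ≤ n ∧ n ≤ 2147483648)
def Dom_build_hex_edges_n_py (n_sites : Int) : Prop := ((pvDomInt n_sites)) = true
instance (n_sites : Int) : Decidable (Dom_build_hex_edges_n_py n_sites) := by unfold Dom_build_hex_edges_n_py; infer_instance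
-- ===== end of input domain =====

-- B replaces A's coordinate→index dictionary, six-direction probing into a set plus final sort
-- by binary search on the lex-sorted coordinate list for the three lex-increasing directions only,
-- appending edges directly in sorted order.

-- ===== PORT A =====
-- helper hex_count
def pvHexCountA (R : Int) : Int := 1 + 3*R*(R+1)

-- the 'while hex_count(R) < n_sites: R += 1' loop (R starts at 0, only increments)
def pvFindRA (n : Int) (R : Nat) : Nat :=
  if pvHexCountA R < n then pvFindRA n (R+1) else R
termination_by (n - pvHexCountA R).toNat
decreasing_by
  have e : pvHexCountA ((R+1 : Nat) : Int) = pvHexCountA R + (6*(R:Int)+6) := by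
    unfold pvHexCountA; push_cast; ring
  rw [e]; omega

-- the two nested 'for' loops building coords
def pvCoordsA (R : Int) : List (Int × Int) :=
  (PySem.List.pyRange (-R) (R+1) 1).foldl (fun acc q =>
    (PySem.List.pyRange (max (-R) (-q-R)) (min R (-q+R) + 1) 1).foldl
      (fun acc2 r => acc2 ++ [(q, r)]) acc) []

def build_hex_edges_n_py (n_sites : Int) : List Int × (List (Int × Int)) :=
  let R : Int := (pvFindRA n_sites 0 : Int)
  let coords := PySem.List.slice (pvCoordsA R) none (some n_sites)
  let coord_to_id : PySem.Dict (Int × Int) Int :=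
    (PySem.List.pyRange 0 n_sites 1).foldl
      (fun d i => d.insert (PySem.List.pyGetD coords i (0,0)) i) PySem.Dict.empty
  let N := PySem.List.pyRange 0 n_sites 1
  let dirs : List (Int × Int) := [(1,0),(1,-1),(0,-1),(-1,0),(-1,1),(0,1)]
  let E : PySem.Set (Int × Int) :=
    N.foldl (fun E u =>
      let qr := PySem.List.pyGetD coords u (0,0)
      dirs.foldl (fun E dd =>
        match coord_to_id.get? (qr.1 + dd.1, qr.2 + dd.2) with
        | some v => if u < v then PySem.Set.add E (u, v) else E
        | none => E) E) PySem.Set.empty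
  (N, PySem.List.sorted2 E (fun p => p.1) (fun p => p.2))

-- ===== PORT B =====
-- the same R-search loop, B's copy
def pvFindRB (n : Int) (R : Nat) : Nat :=
  if 1 + 3*(R:Int)*((R:Int)+1) < n then pvFindRB n (R+1) else R
termination_by (n - (1 + 3*(R:Int)*((R:Int)+1))).toNat
decreasing_by
  have e : 1 + 3*(((R+1 : Nat)):Int)*((((R+1 : Nat)):Int)+1) = 1 + 3*(R:Int)*((R:Int)+1) + (6*(R:Int)+6) := by
    push_cast; ring
  rw [e]; omega

def pvCoordsB (R : Int) : List (Int × Int) :=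
  (PySem.List.pyRange (-R) (R+1) 1).foldl (fun acc q =>
    (PySem.List.pyRange (max (-R) (-q-R)) (min R (-q+R) + 1) 1).foldl
      (fun acc2 r => acc2 ++ [(q, r)]) acc) []

-- Python's 'coords[mid] < t' tuple comparison, and the hand-written binary-search while loop
def pvBsearchB (c : List (Int × Int)) (t : Int × Int) (lo hi : Int) : Int :=
  if h : lo < hi then
    let mid := PySem.Int.floordiv (lo + hi) 2
    if (PySem.List.pyGetD c mid (0,0)).1 < t.1 ∨
        ((PySem.List.pyGetD c mid (0,0)).1 = t.1 ∧ (PySem.List.pyGetD c mid (0,0)).2 < t.2) then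
      pvBsearchB c t (mid + 1) hi
    else
      pvBsearchB c t lo mid
  else lo
termination_by (hi - lo).toNat
decreasing_by
  · have h1 := (PySem.Int.le_floordiv_iff_mul_le (a := lo + hi) (b := 2) (q := lo) (by omega)).mpr (by omega)
    omega
  · have h2 := (PySem.Int.floordiv_lt_iff_lt_mul (a := lo + hi) (b := 2) (q := hi) (by omega)).mpr (by omega)
    omega

def build_hex_edges_n_py_alt (n_sites : Int) : List Int × (List (Int × Int)) :=
  let R : Int := (pvFindRB n_sites 0 : Int)
  let coords := PySem.List.slice (pvCoordsB R) none (some n_sites)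
  let N := PySem.List.pyRange 0 n_sites 1
  let E : List (Int × Int) :=
    N.foldl (fun E u =>
      let qr := PySem.List.pyGetD coords u (0,0)
      ([((0:Int),(1:Int)), (1,-1), (1,0)] : List (Int × Int)).foldl (fun E dd =>
        let t := (qr.1 + dd.1, qr.2 + dd.2)
        let lo := pvBsearchB coords t 0 n_sites
        if lo < n_sites ∧ PySem.List.pyGetD coords lo (0,0) = t then E ++ [(u, lo)] else E) E) []
  (N, E)

-- ===== PRECONDITION & SPEC =====
def Spec_build_hex_edges_n_py (n_sites : Int) (out : List Int × (List (Int × Int))) : Prop := out = build_hex_edges_n_py_alt n_sites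
instance (n_sites : Int) (out : List Int × (List (Int × Int))) : Decidable (Spec_build_hex_edges_n_py n_sites out) := by unfold Spec_build_hex_edges_n_py; infer_instance

-- ===== CLAIM (what is proved, stated in full; the proofs are below) =====
def Claim_equal_build_hex_edges_n_py : Prop := ∀ (n_sites : Int), Dom_build_hex_edges_n_py n_sites → Spec_build_hex_edges_n_py n_sites (build_hex_edges_n_py n_sites)

-- ===== LEMMAS AND PROOFS =====

-- Lexicographic order on Int pairs (Python's tuple comparison), proof-only.
def pvLexLe (a b : Int × Int) : Prop := a.1 < b.1 ∨ (a.1 = b.1 ∧ a.2 ≤ b.2)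
def pvLexLt (a b : Int × Int) : Prop := a.1 < b.1 ∨ (a.1 = b.1 ∧ a.2 < b.2)

-- coords as a flatMap of per-column blocks
lemma pvCoordsA_eq (R : Int) : pvCoordsA R =
    (PySem.List.pyRange (-R) (R+1) 1).flatMap (fun q =>
      (PySem.List.pyRange (max (-R) (-q-R)) (min R (-q+R) + 1) 1).map (fun r => (q, r))) := by
  unfold pvCoordsA
  simp only [PySem.List.foldl_append_singleton_eq_map]
  rw [PySem.List.foldl_append_eq_flatMap]
  simp

lemma pvCoordsA_pairwise (R : Int) : (pvCoordsA R).Pairwise pvLexLt := by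
  rw [pvCoordsA_eq, List.pairwise_flatMap]
  constructor
  · intro q _
    rw [List.pairwise_map]
    exact (PySem.List.pairwise_lt_pyRange_one _ _).imp (fun h => Or.inr ⟨rfl, h⟩)
  · refine (PySem.List.pairwise_lt_pyRange_one _ _).imp ?_
    intro q1 q2 h x hx y hy
    rcases List.mem_map.mp hx with ⟨r1, _, rfl⟩
    rcases List.mem_map.mp hy with ⟨r2, _, rfl⟩
    exact Or.inl h

lemma pvLexLt_ne {a b : Int × Int} (h : pvLexLt a b) : a ≠ b := by
  rcases a with ⟨a1, a2⟩; rcases b with ⟨b1, b2⟩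
  rcases h with h | ⟨h1, h2⟩ <;> simp [Prod.ext_iff] <;> omega

-- sum of |q| over the symmetric range
lemma pv_sum_abs (R : Nat) :
    ((PySem.List.pyRange (-(R:Int)) ((R:Int)+1) 1).map (fun q => |q|)).sum = (R:Int)*((R:Int)+1) := by
  induction R with
  | zero => decide
  | succ R ih =>
    push_cast
    have h3 : -((R:Int)+1)+1 = -(R:Int) := by ring
    have h2 : PySem.List.pyRange (-((R:Int)+1)) ((R:Int)+1) =
        (-((R:Int)+1)) :: PySem.List.pyRange (-(R:Int)) ((R:Int)+1) := by
      rw [PySem.List.pyRange_one_cons (by omega), h3]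
    rw [PySem.List.pyRange_one_succ_right (by omega), List.map_append, List.sum_append,
        h2, List.map_cons, List.sum_cons, ih]
    simp only [List.map_cons, List.map_nil, List.sum_cons, List.sum_nil]
    rw [abs_of_nonpos (by omega : (-((R:Int)+1)) ≤ 0),
        abs_of_nonneg (by omega : (0:Int) ≤ (R:Int)+1)]
    ring

lemma pv_sum_map_sub (l : List Int) (f g : Int → Int) :
    (l.map (fun x => f x - g x)).sum = (l.map f).sum - (l.map g).sum := by
  induction l with
  | nil => simp
  | cons x l ih => simp [ih]; ring

lemma pv_sum_cast_congr (l : List Int) (f : Int → Nat) (g : Int → Int)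
    (h : ∀ x ∈ l, ((f x : Int)) = g x) : (((l.map f).sum : Nat) : Int) = (l.map g).sum := by
  induction l with
  | nil => simp
  | cons x l ih =>
    simp only [List.map_cons, List.sum_cons, Nat.cast_add]
    rw [h x (by simp), ih (fun y hy => h y (by simp [hy]))]

lemma pv_len_coords (R : Nat) :
    (((pvCoordsA (R:Int)).length : Nat) : Int) = 1 + 3*(R:Int)*((R:Int)+1) := by
  rw [pvCoordsA_eq, List.length_flatMap]
  rw [pv_sum_cast_congr _ _ (fun q => (2*(R:Int)+1) - |q|)]
  · rw [pv_sum_map_sub, PySem.List.sum_map_const_int, pv_sum_abs,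
        PySem.List.length_pyRange_one]
    have h2 : (((((R:Int)+1) - (-(R:Int))).toNat : Nat) : Int) = 2*(R:Int)+1 := by omega
    rw [h2]; ring
  · intro q hq
    have hb := PySem.List.mem_pyRange_one.mp hq
    simp only [List.length_map, PySem.List.length_pyRange_one]
    rw [Int.abs_eq_natAbs]
    omega

-- the R-search loop: B's copy equals A's, and its result bounds n
lemma pvFindRB_eq (n : Int) (R : Nat) : pvFindRB n R = pvFindRA n R := by
  fun_induction pvFindRA n R with
  | case1 R h ih => rw [pvFindRB]; simp only [pvHexCountA] at h; rw [if_pos h]; exact ih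
  | case2 R h => rw [pvFindRB]; simp only [pvHexCountA] at h; rw [if_neg h]

lemma pvFindRA_ge (n : Int) (R : Nat) : n ≤ pvHexCountA (pvFindRA n R) := by
  fun_induction pvFindRA n R with
  | case1 R h ih => exact ih
  | case2 R h => omega

-- dict built by inserting distinct keys: lookup characterization
lemma pv_dict_get (l : List Int) (k : Int → Int × Int) (hk : (l.map k).Nodup)
    (p : Int × Int) (v : Int) :
    ((l.foldl (fun d i => d.insert (k i) i) PySem.Dict.empty).get? p = some v) ↔
      (v ∈ l ∧ k v = p) := by
  induction l using List.reverseRecOn with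
  | nil => simp [PySem.Dict.get?_empty]
  | append_singleton l x ih =>
    rw [List.foldl_append] at *
    simp only [List.foldl_cons, List.foldl_nil]
    rw [PySem.Dict.get?_insert]
    rw [List.map_append, List.nodup_append] at hk
    rcases hk with ⟨hk1, -, hdisj⟩
    by_cases hp : p = k x
    · subst hp
      rw [if_pos rfl]
      simp only [Option.some.injEq, List.mem_append, List.mem_singleton]
      constructor
      · rintro rfl; exact ⟨Or.inr rfl, rfl⟩
      · rintro ⟨hv, hkv⟩
        rcases hv with hv | rfl
        · exact absurd rfl (hdisj (k x) (hkv ▸ List.mem_map_of_mem hv) (k x) (by simp))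
        · rfl
    · rw [if_neg hp, ih hk1]
      simp only [List.mem_append, List.mem_singleton]
      constructor
      · rintro ⟨hv, rfl⟩; exact ⟨Or.inl hv, rfl⟩
      · rintro ⟨hv, rfl⟩
        rcases hv with hv | rfl
        · exact ⟨hv, rfl⟩
        · exact absurd rfl hp

-- generic fold lemmas for "only-adds" loops
lemma pv_foldl_mem {α β : Type} (step : List β → α → List β) (Q : α → β → Prop)
    (hstep : ∀ E u p, p ∈ step E u ↔ p ∈ E ∨ Q u p) (l : List α) (E : List β) (p : β) :
    p ∈ l.foldl step E ↔ p ∈ E ∨ ∃ u ∈ l, Q u p := by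
  induction l generalizing E with
  | nil => simp
  | cons a l ih =>
    simp only [List.foldl_cons, ih, hstep, List.mem_cons]
    constructor
    · rintro ((h | h) | ⟨u, hu, h⟩)
      · exact Or.inl h
      · exact Or.inr ⟨a, Or.inl rfl, h⟩
      · exact Or.inr ⟨u, Or.inr hu, h⟩
    · rintro (h | ⟨u, (rfl | hu), h⟩)
      · exact Or.inl (Or.inl h)
      · exact Or.inl (Or.inr h)
      · exact Or.inr ⟨u, hu, h⟩

lemma pv_foldl_nodup {α β : Type} (step : List β → α → List β)
    (hstep : ∀ E u, E.Nodup → (step E u).Nodup) (l : List α) (E : List β) (hE : E.Nodup) :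
    (l.foldl step E).Nodup := by
  induction l generalizing E with
  | nil => exact hE
  | cons a l ih => exact ih _ (hstep _ _ hE)

lemma pv_foldl_app {α β : Type} (g : α → List β) (step : List β → α → List β)
    (hstep : ∀ E u, step E u = E ++ g u) (l : List α) (E : List β) :
    l.foldl step E = E ++ l.flatMap g := by
  induction l generalizing E with
  | nil => simp
  | cons a l ih => simp [hstep, ih, List.flatMap_cons]

-- basic order facts and the six↔three direction reduction
lemma pvLexLt_trans {a b c : Int × Int} (h1 : pvLexLt a b) (h2 : pvLexLt b c) : pvLexLt a c := by
  unfold pvLexLt at *; omega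

lemma pvLexLt_irrefl (a : Int × Int) : ¬ pvLexLt a a := by
  unfold pvLexLt; omega

lemma pv_key_mono (c : List (Int × Int)) (hpair : c.Pairwise pvLexLt) {i j : Int}
    (h0 : 0 ≤ i) (hij : i < j) (hj : j < (c.length : Int)) :
    pvLexLt (PySem.List.pyGetD c i (0,0)) (PySem.List.pyGetD c j (0,0)) := by
  rw [PySem.List.pyGetD_eq_getElem c (0,0) h0 (by omega),
      PySem.List.pyGetD_eq_getElem c (0,0) (by omega) hj]
  exact List.pairwise_iff_getElem.mp hpair i.toNat j.toNat (by omega) (by omega) (by omega)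

lemma pv_key_rank (c : List (Int × Int)) (hpair : c.Pairwise pvLexLt) {i j : Int}
    (_h0i : 0 ≤ i) (hi : i < (c.length : Int)) (h0j : 0 ≤ j) (hj : j < (c.length : Int))
    (h : pvLexLt (PySem.List.pyGetD c i (0,0)) (PySem.List.pyGetD c j (0,0))) : i < j := by
  rcases lt_trichotomy i j with hlt | rfl | hgt
  · exact hlt
  · exact absurd h (pvLexLt_irrefl _)
  · exact absurd (pvLexLt_trans h (pv_key_mono c hpair h0j hgt hi)) (pvLexLt_irrefl _)

lemma pv_dirs_pos (x y : Int × Int) (hlt : pvLexLt x y) :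
    (∃ dd ∈ ([(1,0),(1,-1),(0,-1),(-1,0),(-1,1),(0,1)] : List (Int × Int)),
        y = (x.1 + dd.1, x.2 + dd.2)) ↔
      (∃ dd ∈ ([((0:Int),(1:Int)), (1,-1), (1,0)] : List (Int × Int)),
        y = (x.1 + dd.1, x.2 + dd.2)) := by
  unfold pvLexLt at hlt
  constructor
  · rintro ⟨dd, hdd, rfl⟩
    simp only [List.mem_cons, List.not_mem_nil, or_false] at hdd
    rcases hdd with rfl|rfl|rfl|rfl|rfl|rfl
    · exact ⟨(1,0), by simp, rfl⟩
    · exact ⟨(1,-1), by simp, rfl⟩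
    · exact absurd hlt (by dsimp only; omega)
    · exact absurd hlt (by dsimp only; omega)
    · exact absurd hlt (by dsimp only; omega)
    · exact ⟨(0,1), by simp, rfl⟩
  · rintro ⟨dd, hdd, rfl⟩
    simp only [List.mem_cons, List.not_mem_nil, or_false] at hdd
    rcases hdd with rfl|rfl|rfl
    · exact ⟨(0,1), by simp, rfl⟩
    · exact ⟨(1,-1), by simp, rfl⟩
    · exact ⟨(1,0), by simp, rfl⟩

-- binary search: bounds, invariant, and the found-index characterization
lemma pv_bsearch_bounds (c : List (Int × Int)) (t : Int × Int) :
    ∀ (k : Nat) (lo hi : Int), (hi - lo).toNat = k → lo ≤ hi →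
      lo ≤ pvBsearchB c t lo hi ∧ pvBsearchB c t lo hi ≤ hi := by
  intro k
  induction k using Nat.strong_induction_on with
  | _ k ih =>
    intro lo hi hk hle
    rw [pvBsearchB]
    split
    · rename_i hlt
      have hm1 := (PySem.Int.le_floordiv_iff_mul_le (a := lo + hi) (b := 2) (q := lo) (by omega)).mpr (by omega)
      have hm2 := (PySem.Int.floordiv_lt_iff_lt_mul (a := lo + hi) (b := 2) (q := hi) (by omega)).mpr (by omega)
      dsimp only
      split
      · have := ih (hi - (PySem.Int.floordiv (lo + hi) 2 + 1)).toNat (by omega)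
          (PySem.Int.floordiv (lo + hi) 2 + 1) hi rfl (by omega)
        omega
      · have := ih (PySem.Int.floordiv (lo + hi) 2 - lo).toNat (by omega)
          lo (PySem.Int.floordiv (lo + hi) 2) rfl (by omega)
        omega
    · omega

lemma pv_bsearch_inv (c : List (Int × Int)) (hpair : c.Pairwise pvLexLt) (t : Int × Int) :
    ∀ (k : Nat) (lo hi : Int), (hi - lo).toNat = k → 0 ≤ lo → lo ≤ hi → hi ≤ (c.length : Int) →
      (∀ i, lo ≤ i → i < pvBsearchB c t lo hi → pvLexLt (PySem.List.pyGetD c i (0,0)) t) ∧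
      (∀ i, pvBsearchB c t lo hi ≤ i → i < hi → ¬ pvLexLt (PySem.List.pyGetD c i (0,0)) t) := by
  intro k
  induction k using Nat.strong_induction_on with
  | _ k ih =>
    intro lo hi hk h0 hle hhi
    rw [pvBsearchB]
    split
    · rename_i hlt
      have hm1 := (PySem.Int.le_floordiv_iff_mul_le (a := lo + hi) (b := 2) (q := lo) (by omega)).mpr (by omega)
      have hm2 := (PySem.Int.floordiv_lt_iff_lt_mul (a := lo + hi) (b := 2) (q := hi) (by omega)).mpr (by omega)
      dsimp only
      set mid := PySem.Int.floordiv (lo + hi) 2 with hmid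
      split
      · rename_i hcmp
        have hcmp' : pvLexLt (PySem.List.pyGetD c mid (0,0)) t := hcmp
        have hrec := ih (hi - (mid + 1)).toNat (by omega) (mid + 1) hi rfl (by omega) (by omega) hhi
        refine ⟨?_, hrec.2⟩
        intro i hi1 hi2
        rcases lt_trichotomy i mid with h | rfl | h
        · exact pvLexLt_trans (pv_key_mono c hpair (h0.trans hi1) h (by omega)) hcmp'
        · exact hcmp'
        · exact hrec.1 i (by omega) hi2
      · rename_i hcmp
        have hcmp' : ¬ pvLexLt (PySem.List.pyGetD c mid (0,0)) t := hcmp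
        have hrec := ih (mid - lo).toNat (by omega) lo mid rfl h0 (by omega) (by omega)
        refine ⟨hrec.1, ?_⟩
        intro i hi1 hi2
        rcases lt_trichotomy i mid with h | rfl | h
        · exact hrec.2 i hi1 h
        · exact hcmp'
        · intro habs
          exact hcmp' (pvLexLt_trans (pv_key_mono c hpair (i := mid) (j := i) (by omega) h (by omega)) habs)
    · exact ⟨fun i h1 h2 => absurd h2 (by omega), fun i h1 h2 => absurd h2 (by omega)⟩

lemma pv_bsearch_found (c : List (Int × Int)) (hpair : c.Pairwise pvLexLt) (n : Int)
    (hclen : (c.length : Int) = n) (t : Int × Int) (w : Int)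
    (h0 : 0 ≤ w) (hw : w < n) (hkey : PySem.List.pyGetD c w (0,0) = t) :
    pvBsearchB c t 0 n = w := by
  have hb := pv_bsearch_bounds c t (n - 0).toNat 0 n rfl (by omega)
  have hinv := pv_bsearch_inv c hpair t (n - 0).toNat 0 n rfl (by omega) (by omega) (by omega)
  by_cases hjw : w < pvBsearchB c t 0 n
  · have h1 := hinv.1 w h0 hjw
    rw [hkey] at h1
    exact absurd h1 (pvLexLt_irrefl t)
  · by_cases hjw2 : pvBsearchB c t 0 n < w
    · have h2 := hinv.2 (pvBsearchB c t 0 n) (le_refl _) (by omega)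
      have h3 := pv_key_mono c hpair hb.1 hjw2 (by omega)
      rw [hkey] at h3
      exact absurd h3 h2
    · omega

-- insertion sort by Python's tuple order yields a pvLexLe-sorted list
lemma pv_before_true {a b : Int × Int}
    (h : (decide (a.1 < b.1) || (!decide (b.1 < a.1) && decide (a.2 < b.2))) = true) :
    pvLexLe a b := by
  simp only [Bool.or_eq_true, Bool.and_eq_true, Bool.not_eq_true', decide_eq_true_eq,
    decide_eq_false_iff_not] at h
  unfold pvLexLe; omega

lemma pv_before_false {a b : Int × Int}
    (h : (decide (a.1 < b.1) || (!decide (b.1 < a.1) && decide (a.2 < b.2))) = false) :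
    pvLexLe b a := by
  simp only [Bool.or_eq_false_iff, Bool.and_eq_false_iff, Bool.not_eq_false',
    decide_eq_false_iff_not, decide_eq_true_eq] at h
  unfold pvLexLe; omega

lemma pvLexLe_trans {a b c : Int × Int} (h1 : pvLexLe a b) (h2 : pvLexLe b c) : pvLexLe a c := by
  unfold pvLexLe at *; omega

lemma pv_insertBy_pairwise (x : Int × Int) (ys : List (Int × Int))
    (h : ys.Pairwise pvLexLe) :
    (PySem.List.insertBy
      (fun a b => decide (a.1 < b.1) || (!decide (b.1 < a.1) && decide (a.2 < b.2))) x ys).Pairwise pvLexLe := by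
  induction ys with
  | nil => simp [PySem.List.insertBy]
  | cons y ys ih =>
    rw [PySem.List.insertBy]
    split
    · rename_i hb
      have hxy : pvLexLe x y := pv_before_true hb
      refine List.Pairwise.cons ?_ h
      intro z hz
      rcases List.mem_cons.mp hz with rfl | hz
      · exact hxy
      · exact pvLexLe_trans hxy (List.rel_of_pairwise_cons h hz)
    · rename_i hb
      have hyx : pvLexLe y x := pv_before_false (by simpa using hb)
      refine List.Pairwise.cons ?_ (ih h.tail)
      intro z hz
      rcases (PySem.List.insertBy_mem_iff _ _ _ _).mp hz with rfl | hz
      · exact hyx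
      · exact List.rel_of_pairwise_cons h hz

lemma pv_sorted2_pairwise (xs : List (Int × Int)) :
    (PySem.List.sorted2 xs (fun p => p.1) (fun p => p.2) false).Pairwise pvLexLe := by
  unfold PySem.List.sorted2
  simp only [if_neg (by simp : ¬(false = true))]
  have : ∀ (l : List (Int × Int)) (acc : List (Int × Int)), acc.Pairwise pvLexLe →
      (l.foldl (fun acc x => PySem.List.insertBy
        (fun a b => decide (a.1 < b.1) || (!decide (b.1 < a.1) && decide (a.2 < b.2))) x acc) acc).Pairwise pvLexLe := by
    intro l
    induction l with
    | nil => intro acc h; exact h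
    | cons x l ih => intro acc h; exact ih _ (pv_insertBy_pairwise x acc h)
  exact this xs [] (by simp)


-- A's edge-set loop: membership characterization (generic in the lookup function)
lemma pv_EA_mem (get : Int × Int → Option Int) (key : Int → Int × Int)
    (N : List Int) (dirs : List (Int × Int)) (p : Int × Int) :
    p ∈ N.foldl (fun E u =>
        dirs.foldl (fun E dd =>
          match get ((key u).1 + dd.1, (key u).2 + dd.2) with
          | some v => if u < v then PySem.Set.add E (u, v) else E
          | none => E) E) PySem.Set.empty ↔
      ∃ u ∈ N, ∃ dd ∈ dirs, ∃ v,
        get ((key u).1 + dd.1, (key u).2 + dd.2) = some v ∧ u < v ∧ p = (u, v) := by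
  rw [pv_foldl_mem _
      (fun u p => ∃ dd ∈ dirs, ∃ v, get ((key u).1 + dd.1, (key u).2 + dd.2) = some v ∧ u < v ∧ p = (u, v))]
  · simp [PySem.Set.empty]
  · intro E u q
    rw [pv_foldl_mem _
        (fun dd q => ∃ v, get ((key u).1 + dd.1, (key u).2 + dd.2) = some v ∧ u < v ∧ q = (u, v))]
    intro E' dd q'
    rcases hg : get ((key u).1 + dd.1, (key u).2 + dd.2) with _ | v
    · simp
    · split
      · rename_i x w hw
        injection hw with hw'
        subst hw'
        split
        · rename_i hlt
          rw [PySem.Set.mem_add]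
          constructor
          · rintro (h | rfl)
            · exact Or.inl h
            · exact Or.inr ⟨v, rfl, hlt, rfl⟩
          · rintro (h | ⟨v', hv', _, rfl⟩)
            · exact Or.inl h
            · injection hv' with h2; subst h2; exact Or.inr rfl
        · rename_i hlt
          constructor
          · exact Or.inl
          · rintro (h | ⟨v', hv', hl, rfl⟩)
            · exact h
            · injection hv' with h2; subst h2; exact absurd hl hlt
      · rename_i hw
        simp at hw

lemma pv_EA_nodup (get : Int × Int → Option Int) (key : Int → Int × Int)
    (N : List Int) (dirs : List (Int × Int)) :
    (N.foldl (fun E u =>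
        dirs.foldl (fun E dd =>
          match get ((key u).1 + dd.1, (key u).2 + dd.2) with
          | some v => if u < v then PySem.Set.add E (u, v) else E
          | none => E) E) PySem.Set.empty).Nodup := by
  refine pv_foldl_nodup _ ?_ _ _ List.nodup_nil
  intro E u hE
  refine pv_foldl_nodup _ ?_ _ _ hE
  intro E' dd hE'
  rcases hg : get ((key u).1 + dd.1, (key u).2 + dd.2) with _ | v
  · simpa using hE'
  · split
    · rename_i x w hw
      injection hw with hw2
      subst hw2
      split
      · exact PySem.Set.nodup_add _ _ hE'
      · exact hE'
    · rename_i hw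
      simp at hw

-- B's edge loop as a nested flatMap
lemma pv_EB_eq (n : Int) (J : Int → Int × Int → Int) (cond : Int → Int × Int → Prop)
    [inst : ∀ u dd, Decidable (cond u dd)] (dirs : List (Int × Int)) :
    ((PySem.List.pyRange 0 n).foldl (fun E u =>
        dirs.foldl (fun E dd => if cond u dd then E ++ [(u, J u dd)] else E) E)
      ([] : List (Int × Int))) =
      (PySem.List.pyRange 0 n).flatMap (fun u =>
        dirs.flatMap (fun dd => if cond u dd then [(u, J u dd)] else [])) := by
  rw [pv_foldl_app (fun u => dirs.flatMap (fun dd => if cond u dd then [(u, J u dd)] else []))]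
  · simp
  · intro E u
    rw [pv_foldl_app (fun dd => if cond u dd then [(u, J u dd)] else [])]
    intro E' dd
    split <;> simp

lemma pv_mem_ite_pair {c : Prop} [Decidable c] {p x : Int × Int}
    (h : x ∈ (if c then [p] else ([] : List (Int × Int)))) : c ∧ x = p := by
  split at h <;> simp_all

lemma pv_EBflat_pairwise (n : Int) (J : Int → Int × Int → Int) (cond : Int → Int × Int → Prop)
    [inst : ∀ u dd, Decidable (cond u dd)] (dirs : List (Int × Int))
    (hblock : ∀ u, dirs.Pairwise (fun dd1 dd2 => cond u dd1 → cond u dd2 → J u dd1 < J u dd2)) :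
    ((PySem.List.pyRange 0 n).flatMap (fun u =>
        dirs.flatMap (fun dd => if cond u dd then [(u, J u dd)] else []))).Pairwise pvLexLt := by
  rw [List.pairwise_flatMap]
  constructor
  · intro u _
    rw [List.pairwise_flatMap]
    constructor
    · intro dd _; split <;> simp
    · refine (hblock u).imp ?_
      intro dd1 dd2 h x hx y hy
      obtain ⟨hc1, rfl⟩ := pv_mem_ite_pair hx
      obtain ⟨hc2, rfl⟩ := pv_mem_ite_pair hy
      exact Or.inr ⟨rfl, h hc1 hc2⟩
  · refine (PySem.List.pairwise_lt_pyRange_one _ _).imp ?_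
    intro u1 u2 h x hx y hy
    rcases List.mem_flatMap.mp hx with ⟨dd1, _, hx1⟩
    rcases List.mem_flatMap.mp hy with ⟨dd2, _, hy1⟩
    obtain ⟨_, rfl⟩ := pv_mem_ite_pair hx1
    obtain ⟨_, rfl⟩ := pv_mem_ite_pair hy1
    exact Or.inl h

lemma pv_EBflat_mem (n : Int) (J : Int → Int × Int → Int) (cond : Int → Int × Int → Prop)
    [inst : ∀ u dd, Decidable (cond u dd)] (dirs : List (Int × Int)) (p : Int × Int) :
    p ∈ ((PySem.List.pyRange 0 n).flatMap (fun u =>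
        dirs.flatMap (fun dd => if cond u dd then [(u, J u dd)] else []))) ↔
      ∃ u, (0 ≤ u ∧ u < n) ∧ ∃ dd ∈ dirs, cond u dd ∧ p = (u, J u dd) := by
  simp only [List.mem_flatMap, PySem.List.mem_pyRange_one, List.mem_ite_nil_right,
    List.mem_singleton]

lemma pvLexLe_of_lt {a b : Int × Int} (h : pvLexLt a b) : pvLexLe a b := by
  unfold pvLexLt pvLexLe at *; omega

lemma pvLexLe_antisymm {a b : Int × Int} (h1 : pvLexLe a b) (h2 : pvLexLe b a) : a = b := by
  rcases a with ⟨a1, a2⟩; rcases b with ⟨b1, b2⟩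
  unfold pvLexLe at *
  simp only [Prod.mk.injEq]
  omega

-- proof-only abbreviations for B's lookup target and binary-search result
def pvKey (c : List (Int × Int)) (i : Int) : Int × Int := PySem.List.pyGetD c i (0,0)
def pvTgt (c : List (Int × Int)) (u : Int) (dd : Int × Int) : Int × Int :=
  ((pvKey c u).1 + dd.1, (pvKey c u).2 + dd.2)
def pvJ (c : List (Int × Int)) (n u : Int) (dd : Int × Int) : Int :=
  pvBsearchB c (pvTgt c u dd) 0 n

lemma pv_tgt_lt (c : List (Int × Int)) (u : Int) (dd : Int × Int)
    (hdd : dd ∈ ([((0:Int),(1:Int)), (1,-1), (1,0)] : List (Int × Int))) :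
    pvLexLt (pvKey c u) (pvTgt c u dd) := by
  simp only [List.mem_cons, List.not_mem_nil, or_false] at hdd
  rcases hdd with rfl|rfl|rfl <;> · unfold pvTgt pvLexLt; dsimp only; omega

-- the heart: for any coordinate list c of length n with strictly lex-increasing entries,
-- A's sorted edge set equals B's directly-built edge list
lemma pv_core (n : Int) (c : List (Int × Int))
    (hclen : (c.length : Int) = n) (hpair : c.Pairwise pvLexLt) :
    PySem.List.sorted2
      (List.foldl
        (fun E u =>
          List.foldl
            (fun E dd =>
              match
                (List.foldl (fun d i => d.insert (PySem.List.pyGetD c i (0, 0)) i)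
                      PySem.Dict.empty (PySem.List.pyRange 0 n)).get?
                  ((PySem.List.pyGetD c u (0, 0)).1 + dd.1,
                   (PySem.List.pyGetD c u (0, 0)).2 + dd.2) with
              | some v => if u < v then PySem.Set.add E (u, v) else E
              | none => E)
            E [(1, 0), (1, -1), (0, -1), (-1, 0), (-1, 1), (0, 1)])
        PySem.Set.empty (PySem.List.pyRange 0 n))
      (fun p => p.1) (fun p => p.2) =
    List.foldl
      (fun E u =>
        List.foldl
          (fun E dd =>
            if pvBsearchB c ((PySem.List.pyGetD c u (0,0)).1 + dd.1,
                  (PySem.List.pyGetD c u (0,0)).2 + dd.2) 0 n < n ∧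
                PySem.List.pyGetD c (pvBsearchB c ((PySem.List.pyGetD c u (0,0)).1 + dd.1,
                  (PySem.List.pyGetD c u (0,0)).2 + dd.2) 0 n) (0,0) =
                  ((PySem.List.pyGetD c u (0,0)).1 + dd.1,
                   (PySem.List.pyGetD c u (0,0)).2 + dd.2) then
              E ++ [(u, pvBsearchB c ((PySem.List.pyGetD c u (0,0)).1 + dd.1,
                  (PySem.List.pyGetD c u (0,0)).2 + dd.2) 0 n)]
            else E)
          E [((0:Int),(1:Int)), (1,-1), (1,0)])
      [] (PySem.List.pyRange 0 n) := by
  have hn0 : 0 ≤ n := by omega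
  have hkeys : (PySem.List.pyRange 0 n).map (fun i => PySem.List.pyGetD c i ((0:Int), (0:Int))) = c := by
    conv_lhs => rw [show n = (c.length : Int) from hclen.symm]
    exact PySem.List.map_pyGetD_pyRange_zero' c (0, 0)
  have hknodup : ((PySem.List.pyRange 0 n).map (fun i => PySem.List.pyGetD c i ((0:Int), (0:Int)))).Nodup := by
    rw [hkeys]; exact hpair.imp pvLexLt_ne
  have hdict : ∀ (p : Int × Int) (v : Int),
      ((List.foldl (fun d i => d.insert (pvKey c i) i)
          PySem.Dict.empty (PySem.List.pyRange 0 n)).get? p = some v) ↔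
        (v ∈ PySem.List.pyRange 0 n ∧ pvKey c v = p) :=
    fun p v => pv_dict_get _ _ hknodup p v
  show PySem.List.sorted2
      (List.foldl
        (fun E u =>
          List.foldl
            (fun E dd =>
              match
                (List.foldl (fun d i => d.insert (pvKey c i) i)
                      PySem.Dict.empty (PySem.List.pyRange 0 n)).get? (pvTgt c u dd) with
              | some v => if u < v then PySem.Set.add E (u, v) else E
              | none => E)
            E [(1, 0), (1, -1), (0, -1), (-1, 0), (-1, 1), (0, 1)])
        PySem.Set.empty (PySem.List.pyRange 0 n))
      (fun p => p.1) (fun p => p.2) =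
    List.foldl
      (fun E u =>
        List.foldl
          (fun E dd =>
            if pvJ c n u dd < n ∧ pvKey c (pvJ c n u dd) = pvTgt c u dd then
              E ++ [(u, pvJ c n u dd)] else E)
          E [((0:Int),(1:Int)), (1,-1), (1,0)])
      [] (PySem.List.pyRange 0 n)
  rw [pv_EB_eq n (pvJ c n)
      (fun u dd => pvJ c n u dd < n ∧ pvKey c (pvJ c n u dd) = pvTgt c u dd)
      [((0:Int),(1:Int)), (1,-1), (1,0)]]
  have hb : ∀ t, 0 ≤ pvBsearchB c t 0 n ∧ pvBsearchB c t 0 n ≤ n :=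
    fun t => pv_bsearch_bounds c t (n - 0).toNat 0 n rfl hn0
  have hfound : ∀ (t : Int × Int) (w : Int), 0 ≤ w → w < n → pvKey c w = t →
      pvBsearchB c t 0 n = w :=
    fun t w h1 h2 h3 => pv_bsearch_found c hpair n hclen t w h1 h2 h3
  have hmono : ∀ {i j : Int}, 0 ≤ i → i < j → j < n → pvLexLt (pvKey c i) (pvKey c j) :=
    fun h0 hij hj => pv_key_mono c hpair h0 hij (by omega)
  have hrank : ∀ {i j : Int}, 0 ≤ i → i < n → 0 ≤ j → j < n →
      pvLexLt (pvKey c i) (pvKey c j) → i < j :=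
    fun h1 h2 h3 h4 h5 => pv_key_rank c hpair h1 (by omega) h3 (by omega) h5
  have hblock : ∀ u, ([((0:Int),(1:Int)), (1,-1), (1,0)] : List (Int × Int)).Pairwise
      (fun dd1 dd2 => (pvJ c n u dd1 < n ∧ pvKey c (pvJ c n u dd1) = pvTgt c u dd1) →
        (pvJ c n u dd2 < n ∧ pvKey c (pvJ c n u dd2) = pvTgt c u dd2) →
        pvJ c n u dd1 < pvJ c n u dd2) := by
    intro u
    have hstep : ∀ dd1 dd2, pvLexLt (pvTgt c u dd1) (pvTgt c u dd2) →
        (pvJ c n u dd1 < n ∧ pvKey c (pvJ c n u dd1) = pvTgt c u dd1) →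
        (pvJ c n u dd2 < n ∧ pvKey c (pvJ c n u dd2) = pvTgt c u dd2) →
        pvJ c n u dd1 < pvJ c n u dd2 := by
      intro dd1 dd2 hlt hc1 hc2
      exact hrank (hb _).1 hc1.1 (hb _).1 hc2.1 (by rw [hc1.2, hc2.2]; exact hlt)
    refine List.Pairwise.cons ?_ (List.Pairwise.cons ?_ (List.pairwise_singleton _ _))
    · intro dd2 hdd2
      rcases List.mem_cons.mp hdd2 with rfl | hdd2
      · exact hstep _ _ (by unfold pvTgt pvLexLt; dsimp only; omega)
      · rw [List.mem_singleton] at hdd2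
        subst hdd2
        exact hstep _ _ (by unfold pvTgt pvLexLt; dsimp only; omega)
    · intro dd2 hdd2
      rw [List.mem_singleton] at hdd2
      subst hdd2
      exact hstep _ _ (by unfold pvTgt pvLexLt; dsimp only; omega)
  have hBpw := pv_EBflat_pairwise n (pvJ c n)
      (fun u dd => pvJ c n u dd < n ∧ pvKey c (pvJ c n u dd) = pvTgt c u dd)
      [((0:Int),(1:Int)), (1,-1), (1,0)] hblock
  refine List.Perm.eq_of_pairwise (fun a b _ _ h1 h2 => pvLexLe_antisymm h1 h2)
    (pv_sorted2_pairwise _) (hBpw.imp pvLexLe_of_lt)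
    ((PySem.List.sorted2_perm _ _ _ _).trans
      ((List.perm_ext_iff_of_nodup
        (pv_EA_nodup _ (fun i => pvKey c i) _ _)
        (hBpw.imp pvLexLt_ne)).mpr ?_))
  intro p
  rw [pv_EA_mem _ (fun i => pvKey c i),
      pv_EBflat_mem n (pvJ c n)
        (fun u dd => pvJ c n u dd < n ∧ pvKey c (pvJ c n u dd) = pvTgt c u dd)
        [((0:Int),(1:Int)), (1,-1), (1,0)]]
  constructor
  · rintro ⟨u, hu, dd, hdd, v, hg, hlt, rfl⟩
    rcases (hdict _ _).mp hg with ⟨hv, hkv⟩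
    rw [PySem.List.mem_pyRange_one] at hu hv
    have hltk : pvLexLt (pvKey c u) (pvKey c v) := hmono hu.1 hlt hv.2
    obtain ⟨dd', hdd', hk'⟩ := (pv_dirs_pos (pvKey c u) (pvKey c v) hltk).mp ⟨dd, hdd, hkv⟩
    have hj : pvJ c n u dd' = v := hfound _ v hv.1 hv.2 hk'
    refine ⟨u, ⟨hu.1, hu.2⟩, dd', hdd', ⟨?_, ?_⟩, ?_⟩
    · rw [hj]; exact hv.2
    · rw [hj]; exact hk'
    · rw [hj]
  · rintro ⟨u, ⟨h0u, hun⟩, dd, hdd, ⟨hjn, hkeyj⟩, rfl⟩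
    have h0j : 0 ≤ pvJ c n u dd := (hb _).1
    have hltk : pvLexLt (pvKey c u) (pvKey c (pvJ c n u dd)) := by
      rw [hkeyj]; exact pv_tgt_lt c u dd hdd
    have hlt : u < pvJ c n u dd := hrank h0u hun h0j hjn hltk
    obtain ⟨dd6, hdd6, hk6⟩ := (pv_dirs_pos (pvKey c u) (pvKey c (pvJ c n u dd)) hltk).mpr
      ⟨dd, hdd, hkeyj⟩
    refine ⟨u, PySem.List.mem_pyRange_one.mpr ⟨h0u, by omega⟩, dd6, hdd6, pvJ c n u dd,
      (hdict _ _).mpr ⟨PySem.List.mem_pyRange_one.mpr ⟨h0j, hjn⟩, hk6⟩, hlt, rfl⟩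

lemma pv_main (n : Int) (hn : 1 ≤ n) : build_hex_edges_n_py n = build_hex_edges_n_py_alt n := by
  simp only [build_hex_edges_n_py, build_hex_edges_n_py_alt]
  rw [pvFindRB_eq]
  have hCB : pvCoordsB = pvCoordsA := rfl
  rw [hCB]
  have hge : n ≤ 1 + 3*((pvFindRA n 0 : Nat):Int)*(((pvFindRA n 0 : Nat):Int)+1) := by
    have h := pvFindRA_ge n 0
    simpa [pvHexCountA] using h
  have hlenC := pv_len_coords (pvFindRA n 0)
  have hcEq : PySem.List.slice (pvCoordsA ((pvFindRA n 0 : Nat):Int)) none (some n)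
      = (pvCoordsA ((pvFindRA n 0 : Nat):Int)).take n.toNat :=
    PySem.List.slice_to _ (by omega)
  have hclen : ((PySem.List.slice (pvCoordsA ((pvFindRA n 0 : Nat):Int)) none (some n)).length : Int) = n := by
    rw [hcEq, List.length_take]
    omega
  have hcpair : (PySem.List.slice (pvCoordsA ((pvFindRA n 0 : Nat):Int)) none (some n)).Pairwise pvLexLt := by
    rw [hcEq]
    exact (pvCoordsA_pairwise _).sublist (List.take_sublist _ _)
  exact congrArg (Prod.mk _) (pv_core n _ hclen hcpair)

-- ===== VERDICT (by name: the statement is the Claim_ definition above) =====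
theorem build_hex_edges_n_py_spec : Claim_equal_build_hex_edges_n_py := by
  intro n _
  unfold Spec_build_hex_edges_n_py
  by_cases hn : 1 ≤ n
  · exact pv_main n hn
  · have h0 : PySem.List.pyRange 0 n = [] := PySem.List.pyRange_one_eq_nil (by omega)
    simp [build_hex_edges_n_py, build_hex_edges_n_py_alt, h0, PySem.List.sorted2,
      PySem.Set.empty]
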